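-- pv_equiv track=rewrite | github.com/KINOX0924/Programmers_codingtest | 프로그래머스/0/181890. 왼쪽 오른쪽/왼쪽 오른쪽.py | solution
-- ===== SOURCE A (Python) =====
-- def solution(str_list):
--     answer     = []
--     left_list  = []
--     right_list = []
--
--     if "l" not in str_list and "r" not in str_list :
--         return answer
--
--     for index , word in enumerate(str_list) :
--         if len(left_list) == 0 and word == "l" :
--             return answer
--         elif word != "l" and word != "r" :
--             left_list.append(word)
--         elif len(left_list) > 0 and word == "l" :
--             answer = left_list
--             return answer
--         elif word == "r" :
--             for i in range(index + 1 , len(str_list)) :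
--                 answer.append(str_list[i])
--             return answer
--
--     return answer
-- ===== SOURCE B (Python) =====
-- def solution(str_list):
--     n = len(str_list)
--     li = str_list.index("l") if "l" in str_list else n
--     ri = str_list.index("r") if "r" in str_list else n
--     if li < ri:
--         return str_list[:li]
--     if ri < li:
--         return str_list[ri + 1:]
--     return []
-- ===== Notes on version B (the rewrite author's own statement) =====
-- stated objective: idiomatic
-- what changed: Replaces A's single accumulating enumerate-loop (with a left_list accumulator and an inner index copy loop) by a positions-first decomposition: compute the first index of 'l' and of 'r' up front via membership + list.index, compare them, and return one slice.
import Mathlib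
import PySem

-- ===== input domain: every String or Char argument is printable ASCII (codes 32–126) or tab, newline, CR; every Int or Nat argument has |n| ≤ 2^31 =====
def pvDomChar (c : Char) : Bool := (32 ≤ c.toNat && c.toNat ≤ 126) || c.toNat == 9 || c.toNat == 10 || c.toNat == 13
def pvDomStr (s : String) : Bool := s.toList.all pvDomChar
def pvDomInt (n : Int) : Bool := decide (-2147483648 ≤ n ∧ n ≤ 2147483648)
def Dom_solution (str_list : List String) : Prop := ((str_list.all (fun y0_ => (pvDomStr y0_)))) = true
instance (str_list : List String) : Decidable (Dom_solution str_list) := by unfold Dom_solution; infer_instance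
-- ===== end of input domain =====

-- B replaces A's single accumulating scan by a positions-first decomposition:
-- find the index of the first "l" and of the first "r", compare, return one slice (idiomatic).

-- ===== PORT A =====
-- the enumerate loop of A, with left_list as the accumulating state
def solutionGo (str_list : List String) : List (Int × String) → List String → List String
  | [], _ => []
  | (index, word) :: rest, left_list =>
    if left_list.length == 0 && word == "l" then []
    else if word != "l" && word != "r" then
      solutionGo str_list rest (left_list ++ [word])
    else if decide (left_list.length > 0) && word == "l" then left_list
    else if word == "r" then
      (PySem.List.pyRange (index + 1) (str_list.length : Int) 1).foldl
        (fun acc i => acc ++ [PySem.List.pyGetD str_list i ""]) []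
    else solutionGo str_list rest left_list

def solution (str_list : List String) : List String :=
  if !str_list.contains "l" && !str_list.contains "r" then []
  else solutionGo str_list (PySem.List.enumerate str_list 0) []

-- ===== PORT B =====
def solution_alt (str_list : List String) : List String :=
  let n : Int := str_list.length
  let li : Int := if str_list.contains "l" then ((PySem.List.index? str_list "l").getD 0 : Nat) else n
  let ri : Int := if str_list.contains "r" then ((PySem.List.index? str_list "r").getD 0 : Nat) else n
  if li < ri then PySem.List.slice str_list none (some li)
  else if ri < li then PySem.List.slice str_list (some (ri + 1)) none
  else []

-- ===== PRECONDITION & SPEC =====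
def Spec_solution (str_list : List String) (out : List String) : Prop := out = solution_alt str_list
instance (str_list : List String) (out : List String) : Decidable (Spec_solution str_list out) := by unfold Spec_solution; infer_instance

-- ===== CLAIM (what is proved, stated in full; the proofs are below) =====
def Claim_equal_solution : Prop := ∀ (str_list : List String), Dom_solution str_list → Spec_solution str_list (solution str_list)

-- ===== LEMMAS AND PROOFS =====

-- the common mathematical core: scan for the first "l"/"r", with the l/r-free prefix as accumulator
def core : List String → List String → List String
  | [], _ => []
  | w :: ws, pre =>
    if w = "l" then pre
    else if w = "r" then ws
    else core ws (pre ++ [w])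

theorem index?_append_of_not_mem {α : Type} [BEq α] [LawfulBEq α] (l t : List α) (v : α)
    (h : v ∉ l) : PySem.List.index? (l ++ t) v = (PySem.List.index? t v).map (· + l.length) := by
  induction l with
  | nil => simp [Option.map_id']
  | cons x xs ih =>
    have hx : x ≠ v := by intro e; exact h (e ▸ List.mem_cons_self)
    rw [List.cons_append, PySem.List.index?_cons_of_ne (xs ++ t) hx,
      ih (by simp at h; exact h.2)]
    cases PySem.List.index? t v <;> simp <;> omega

theorem solutionGo_core (rest : List String) : ∀ pre : List String,
    solutionGo (pre ++ rest) (PySem.List.enumerate rest (pre.length : Int)) pre = core rest pre := by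
  induction rest with
  | nil => intro pre; simp [solutionGo, core]
  | cons w ws ih =>
    intro pre
    rw [PySem.List.enumerate_cons]
    by_cases hl : w = "l"
    · subst hl
      rcases pre with _ | ⟨p, ps⟩
      · simp [solutionGo, core]
      · simp [solutionGo, core]
    · by_cases hr : w = "r"
      · subst hr
        have e1 : (("r" : String) == "l") = false := by decide
        have e3 : (("r" : String) != "r") = false := by decide
        have e4 : (("r" : String) == "r") = true := by decide
        simp only [solutionGo, core, e1, e3, e4, Bool.and_false, Bool.false_eq_true, if_false,
          if_true]
        rw [PySem.List.foldl_pyRange_pyGetD' (pre ++ "r" :: ws) "" (fun acc x => acc ++ [x]) []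
          (by omega), PySem.List.foldl_append_singleton]
        have ht : ((pre.length : Int) + 1).toNat = pre.length + 1 := by omega
        have hsp : pre ++ "r" :: ws = (pre ++ ["r"]) ++ ws := by simp
        rw [ht, hsp, show pre.length + 1 = (pre ++ ["r"]).length by simp, List.drop_left]
        simp [hl]
      · have bl : (w == "l") = false := by simp [hl]
        have br : (w == "r") = false := by simp [hr]
        have nbl : (w != "l") = true := by simp [bne, bl]
        have nbr : (w != "r") = true := by simp [bne, br]
        simp only [solutionGo, core, bl, br, nbl, nbr, Bool.and_false, Bool.false_eq_true,
          if_false, Bool.and_self, if_true, if_neg hl, if_neg hr]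
        have h2 : (pre ++ [w]) ++ ws = pre ++ w :: ws := by simp
        have h1 : ((pre ++ [w]).length : Int) = (pre.length : Int) + 1 := by simp
        rw [← h2, ← h1, ih (pre ++ [w])]

theorem alt_core (rest : List String) : ∀ pre : List String, "l" ∉ pre → "r" ∉ pre →
    solution_alt (pre ++ rest) = if "l" ∈ rest ∨ "r" ∈ rest then core rest pre else [] := by
  induction rest with
  | nil =>
    intro pre hpl hpr
    simp [solution_alt, hpl, hpr]
  | cons w ws ih =>
    intro pre hpl hpr
    by_cases hl : w = "l"
    · subst hl
      have hcl : (pre ++ "l" :: ws).contains "l" = true := by simp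
      have hil : PySem.List.index? (pre ++ "l" :: ws) "l" = some pre.length := by
        rw [index?_append_of_not_mem _ _ _ hpl, PySem.List.index?_cons_self]; simp
      have hri : ((pre.length : Nat) : Int) <
          (if (pre ++ "l" :: ws).contains "r"
            then (((PySem.List.index? (pre ++ "l" :: ws) "r").getD 0 : Nat) : Int)
            else (((pre ++ "l" :: ws).length : Nat) : Int)) := by
        by_cases hm : "r" ∈ pre ++ "l" :: ws
        · rw [if_pos (by simpa using hm)]
          rw [index?_append_of_not_mem _ _ _ hpr,
            PySem.List.index?_cons_of_ne ws (by decide : ("l" : String) ≠ "r")]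
          rcases hk : PySem.List.index? ws "r" with _ | k
          · exfalso
            have hnr := (PySem.List.index?_eq_none_iff ws "r").mp hk
            simp [hpr, hnr] at hm
          · simp only [Option.map_some, Option.getD_some]
            push_cast
            omega
        · rw [if_neg (by simpa using hm)]
          simp only [List.length_append, List.length_cons]
          push_cast
          omega
      simp only [solution_alt, hcl, if_true, hil, Option.getD_some]
      rw [if_pos hri, PySem.List.slice_to _ (by positivity)]
      simp only [core, Int.toNat_natCast]
      exact List.take_left
    · by_cases hr : w = "r"
      · subst hr
        have hcr : (pre ++ "r" :: ws).contains "r" = true := by simp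
        have hir : PySem.List.index? (pre ++ "r" :: ws) "r" = some pre.length := by
          rw [index?_append_of_not_mem _ _ _ hpr, PySem.List.index?_cons_self]; simp
        have hli : ((pre.length : Nat) : Int) <
            (if (pre ++ "r" :: ws).contains "l"
              then (((PySem.List.index? (pre ++ "r" :: ws) "l").getD 0 : Nat) : Int)
              else (((pre ++ "r" :: ws).length : Nat) : Int)) := by
          by_cases hm : "l" ∈ pre ++ "r" :: ws
          · rw [if_pos (by simpa using hm)]
            rw [index?_append_of_not_mem _ _ _ hpl,
              PySem.List.index?_cons_of_ne ws (by decide : ("r" : String) ≠ "l")]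
            rcases hk : PySem.List.index? ws "l" with _ | k
            · exfalso
              have hnl := (PySem.List.index?_eq_none_iff ws "l").mp hk
              simp [hpl, hnl] at hm
            · simp only [Option.map_some, Option.getD_some]
              push_cast
              omega
          · rw [if_neg (by simpa using hm)]
            simp only [List.length_append, List.length_cons]
            push_cast
            omega
        simp only [solution_alt, hcr, if_true, hir, Option.getD_some]
        rw [if_neg (by omega), if_pos hli, PySem.List.slice_from _ (by positivity)]
        have ht : ((pre.length : Int) + 1).toNat = pre.length + 1 := by omega
        have hsp : pre ++ "r" :: ws = (pre ++ ["r"]) ++ ws := by simp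
        rw [ht, hsp, show pre.length + 1 = (pre ++ ["r"]).length by simp, List.drop_left]
        simp [core]
      · have hl' : "l" ∉ pre ++ [w] := by
          intro hmem
          rcases List.mem_append.mp hmem with h | h
          · exact hpl h
          · exact hl (List.mem_singleton.mp h).symm
        have hr' : "r" ∉ pre ++ [w] := by
          intro hmem
          rcases List.mem_append.mp hmem with h | h
          · exact hpr h
          · exact hr (List.mem_singleton.mp h).symm
        have h2 : (pre ++ [w]) ++ ws = pre ++ w :: ws := by simp
        have hIH := ih (pre ++ [w]) hl' hr'
        rw [h2] at hIH
        rw [hIH]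
        by_cases hc : "l" ∈ ws ∨ "r" ∈ ws
        · rw [if_pos hc, if_pos (by
            rcases hc with h | h
            exacts [Or.inl (List.mem_cons_of_mem _ h), Or.inr (List.mem_cons_of_mem _ h)])]
          simp [core, hl, hr]
        · rw [if_neg hc, if_neg (by
            rintro (h | h)
            · rcases List.mem_cons.mp h with e | e
              · exact hl e.symm
              · exact hc (Or.inl e)
            · rcases List.mem_cons.mp h with e | e
              · exact hr e.symm
              · exact hc (Or.inr e))]

theorem solution_eq_alt (s : List String) : solution s = solution_alt s := by
  have halt := alt_core s [] (by simp) (by simp)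
  simp only [List.nil_append] at halt
  have hgo := solutionGo_core s []
  simp only [List.nil_append, List.length_nil, Nat.cast_zero] at hgo
  unfold solution
  rw [halt]
  by_cases hlr : "l" ∈ s ∨ "r" ∈ s
  · rw [if_pos hlr, ← hgo]
    have hc : (!s.contains "l" && !s.contains "r") = false := by
      rcases hlr with h | h <;> simp [h]
    rw [hc]
    simp
  · rw [if_neg hlr]
    push_neg at hlr
    have hc : (!s.contains "l" && !s.contains "r") = true := by simp [hlr.1, hlr.2]
    rw [hc]
    simp

-- ===== VERDICT (by name: the statement is the Claim_ definition above) =====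
theorem solution_spec : Claim_equal_solution := by
  intro s _
  exact solution_eq_alt s
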